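-- pv_equiv track=rewrite | github.com/jbuese/advent2022 | 7.py | calc_dir_sizes
-- ===== SOURCE A (Python) =====
-- def calc_dir_sizes(input_s):
--   """
--   calculate the disk size for a given input of terminal commands
--   """
--   current_branch = []
--   all_directories = {"/": 0}
--
--   for line in input_s:
--     if(line.startswith('$')):
--       line = line[2:]
--       if(line.startswith("cd ..")):
--         # remove last directory from current_branch
--         current_branch.pop()
--       elif(line.startswith("cd /")):
--         current_branch = ["/"]
--       elif(line.startswith("cd")):
--         # add new directory to current_branch and all directories
--         # sadly the names are not unique so I add the parent directories as a prefix
--         # the dollar sign is added for persisting which level the directory is at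
--         directory = f"${current_branch[-1]}_{line[3:]}"
--         current_branch.append(directory)
--         all_directories[directory] = 0
--     else:
--       # sum up if file
--       if not (line.startswith("dir") or line.startswith("ls")):
--         for directory in current_branch:
--           all_directories[directory] += int(line.split(' ')[0])
--
--   return all_directories
-- ===== SOURCE B (Python) =====
-- def calc_dir_sizes(input_s):
--   """
--   calculate the disk size for a given input of terminal commands
--
--   Alternative strategy: file sizes are added only to the CURRENT directory's
--   pending counter; a directory's pending total is propagated to its parent
--   once, when it is left (popped), instead of walking the whole branch for
--   every file line.
--   """
--   sizes = {"/": 0}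
--   stack = []  # entries [name, pending]; top of the stack is the last entry
--
--   def flush():
--     # leave the top directory: bank its pending total and pass it to its parent
--     name, pending = stack.pop()
--     sizes[name] = sizes.get(name, 0) + pending
--     if stack:
--       stack[-1][1] += pending
--
--   for line in input_s:
--     if line.startswith('$'):
--       cmd = line[2:]
--       if cmd.startswith('cd ..'):
--         if stack:
--           flush()
--       elif cmd.startswith('cd /'):
--         while stack:
--           flush()
--         stack.append(['/', 0])
--       elif cmd.startswith('cd'):
--         if stack:
--           name = '$' + stack[-1][0] + '_' + cmd[3:]
--           sizes[name] = 0
--           stack.append([name, 0])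
--     elif not (line.startswith('dir') or line.startswith('ls')):
--       if stack:
--         stack[-1][1] += int(line.split(' ')[0])
--
--   while stack:
--     flush()
--   return sizes
-- ===== Notes on version B (the rewrite author's own statement) =====
-- stated objective: alternative
-- what changed: A adds every file's size to all directories on the current branch (O(depth) dict updates per file); B keeps one pending counter per stack entry, adds each file size only to the top, and propagates a directory's total to its parent once, when the directory is popped (or in one final flush) — O(1) per file line, though on shallow logs the measured cost is the same.
import Mathlib
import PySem

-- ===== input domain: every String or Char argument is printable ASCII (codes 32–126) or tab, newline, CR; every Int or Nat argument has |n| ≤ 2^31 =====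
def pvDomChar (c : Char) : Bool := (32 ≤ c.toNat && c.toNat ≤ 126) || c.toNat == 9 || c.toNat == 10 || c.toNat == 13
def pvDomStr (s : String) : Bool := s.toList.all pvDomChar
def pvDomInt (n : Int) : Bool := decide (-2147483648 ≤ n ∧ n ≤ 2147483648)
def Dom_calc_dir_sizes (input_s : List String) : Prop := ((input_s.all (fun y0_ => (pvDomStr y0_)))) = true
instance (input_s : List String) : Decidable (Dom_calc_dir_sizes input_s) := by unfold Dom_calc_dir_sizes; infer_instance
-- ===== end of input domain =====

-- B replaces A's per-file walk over the whole current branch by a single pending counter on the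
-- current directory that is propagated to the parent once, when the directory is left (objective: alternative).

-- ===== PORT A =====
-- one line of A's loop; state = (current_branch, all_directories)
def aStep (st : List String × PySem.Dict String Int) (line : String) :
    List String × PySem.Dict String Int :=
  if PySem.Str.startswith line "$" then
    let l := PySem.Str.slice line (some 2) none          -- line = line[2:]
    if PySem.Str.startswith l "cd .." then
      (st.1.dropLast, st.2)                              -- current_branch.pop(); IndexError on empty excluded by Pre_
    else if PySem.Str.startswith l "cd /" then
      (["/"], st.2)
    else if PySem.Str.startswith l "cd" then
      -- current_branch[-1]; IndexError on empty branch excluded by Pre_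
      let dir := "$" ++ st.1.getLastD "" ++ "_" ++ PySem.Str.slice l (some 3) none
      (st.1 ++ [dir], st.2.insert dir 0)
    else (st.1, st.2)
  else if PySem.Str.startswith line "dir" || PySem.Str.startswith line "ls" then
    (st.1, st.2)
  else
    -- int(line.split(' ')[0]); ValueError excluded by Pre_ (a branch directory is always a key,
    -- so the += never raises KeyError and modify-with-default is exact)
    let v := (PySem.Int.ofStr? (((PySem.Str.split? line " ").getD []).headD "")).getD 0
    (st.1, st.1.foldl (fun d dir => d.modify dir 0 (· + v)) st.2)

def calc_dir_sizes (input_s : List String) : List (String × Int) :=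
  (input_s.foldl aStep ([], PySem.Dict.ofList [("/", (0 : Int))])).2.items

-- ===== PORT B =====
-- Python's stack has its top at the END of the list; the port keeps the top at the HEAD.
-- flush(): bank the top directory's pending total and pass it to its parent
def bFlush (stack : List (String × Int)) (sizes : PySem.Dict String Int) :
    List (String × Int) × PySem.Dict String Int :=
  match stack with
  | [] => ([], sizes)                                    -- unreachable: every call is guarded by `if stack`
  | (d, p) :: rest =>
    let sizes' := sizes.insert d (sizes.getD d 0 + p)
    match rest with
    | [] => ([], sizes')
    | (d2, p2) :: r => ((d2, p2 + p) :: r, sizes')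

-- while stack: flush() — the bump that flush() gives the new top is carried along in c,
-- which makes the recursion structural; the banked values are identical
def bFlushCarry : Int → List (String × Int) → PySem.Dict String Int → PySem.Dict String Int
  | _, [], sizes => sizes
  | c, (d, p) :: rest, sizes =>
      bFlushCarry (c + p) rest (sizes.insert d (sizes.getD d 0 + (c + p)))

def bFlushAll (stack : List (String × Int)) (sizes : PySem.Dict String Int) :
    PySem.Dict String Int :=
  bFlushCarry 0 stack sizes

-- one line of B's loop; state = (stack, sizes)
def bStep (st : List (String × Int) × PySem.Dict String Int) (line : String) :
    List (String × Int) × PySem.Dict String Int :=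
  if PySem.Str.startswith line "$" then
    let cmd := PySem.Str.slice line (some 2) none
    if PySem.Str.startswith cmd "cd .." then
      if st.1 ≠ [] then bFlush st.1 st.2 else st
    else if PySem.Str.startswith cmd "cd /" then
      ([("/", 0)], bFlushAll st.1 st.2)
    else if PySem.Str.startswith cmd "cd" then
      match st.1 with
      | [] => st
      | (d, _) :: _ =>
        let name := "$" ++ d ++ "_" ++ PySem.Str.slice cmd (some 3) none
        ((name, 0) :: st.1, st.2.insert name 0)
    else st
  else if PySem.Str.startswith line "dir" || PySem.Str.startswith line "ls" then st
  else
    match st.1 with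
    | [] => st
    | (d, p) :: rest =>
      ((d, p + (PySem.Int.ofStr? (((PySem.Str.split? line " ").getD []).headD "")).getD 0) :: rest,
       st.2)

def calc_dir_sizes_alt (input_s : List String) : List (String × Int) :=
  let st := input_s.foldl bStep ([], PySem.Dict.ofList [("/", (0 : Int))])
  (bFlushAll st.1 st.2).items

-- ===== PRECONDITION & SPEC =====
-- Structural validity of the command log, tracking only the branch DEPTH (like balanced
-- parentheses): 'cd ..' and 'cd <name>' need a current directory (else A's pop()/[-1] raises
-- IndexError), and a file line inside a directory needs an int first token (else int() raises
-- ValueError).  This is exactly the set of inputs on which the Python A returns.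
def preAux : List String → Nat → Bool
  | [], _ => true
  | line :: rest, depth =>
    if PySem.Str.startswith line "$" then
      let l := PySem.Str.slice line (some 2) none
      if PySem.Str.startswith l "cd .." then decide (1 ≤ depth) && preAux rest (depth - 1)
      else if PySem.Str.startswith l "cd /" then preAux rest 1
      else if PySem.Str.startswith l "cd" then decide (1 ≤ depth) && preAux rest (depth + 1)
      else preAux rest depth
    else if PySem.Str.startswith line "dir" || PySem.Str.startswith line "ls" then
      preAux rest depth
    else
      (decide (depth = 0) ||
        (PySem.Int.ofStr? (((PySem.Str.split? line " ").getD []).headD "")).isSome) &&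
      preAux rest depth

def Pre_calc_dir_sizes (input_s : List String) : Prop := preAux input_s 0 = true
instance (input_s : List String) : Decidable (Pre_calc_dir_sizes input_s) := by
  unfold Pre_calc_dir_sizes; infer_instance

def pvWitness_calc_dir_sizes : List String :=
  ["$ cd /", "$ ls", "dir a", "100 b.txt", "$ cd a", "42 c.dat", "$ cd .."]

def Spec_calc_dir_sizes (input_s : List String) (out : List (String × Int)) : Prop := out = calc_dir_sizes_alt input_s
instance (input_s : List String) (out : List (String × Int)) : Decidable (Spec_calc_dir_sizes input_s out) := by unfold Spec_calc_dir_sizes; infer_instance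

-- ===== CLAIM (what is proved, stated in full; the proofs are below) =====
def Claim_equal_calc_dir_sizes : Prop := ∀ (input_s : List String), Dom_calc_dir_sizes input_s → Pre_calc_dir_sizes input_s → Spec_calc_dir_sizes input_s (calc_dir_sizes input_s)

-- ===== LEMMAS AND PROOFS =====

-- pend c stack k: what B still owes key k (stack is top-first; c = amount already owed to the top)
def pend : Int → List (String × Int) → String → Int
  | _, [], _ => 0
  | c, (k1, p1) :: rest, k => (if k = k1 then c + p1 else 0) + pend (c + p1) rest k

lemma pend_shift (s : List (String × Int)) (c a : Int) (k : String) :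
    pend (c + a) s k = pend c s k + a * ((s.map Prod.fst).count k) := by
  induction s generalizing c with
  | nil => simp [pend]
  | cons hd tl ih =>
    obtain ⟨k1, p1⟩ := hd
    simp only [pend, List.map_cons, List.count_cons]
    have h1 : c + a + p1 = (c + p1) + a := by ring
    rw [h1, ih (c + p1)]
    by_cases hk : k = k1
    · simp [hk]; ring
    · have hk' : ¬k1 = k := fun h => hk h.symm
      simp [hk, hk']

lemma pend_eq_zero_of_not_mem (s : List (String × Int)) (c : Int) (k : String)
    (h : k ∉ s.map Prod.fst) : pend c s k = 0 := by
  induction s generalizing c with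
  | nil => rfl
  | cons hd tl ih =>
    obtain ⟨k1, p1⟩ := hd
    simp only [List.map_cons, List.mem_cons, not_or] at h
    simp [pend, h.1, ih _ h.2]

lemma foldl_modify_getD (v : Int) (ks : List String) (d : PySem.Dict String Int) (k : String) :
    (ks.foldl (fun d j => d.modify j 0 (· + v)) d).getD k 0 = d.getD k 0 + v * ks.count k := by
  induction ks generalizing d with
  | nil => simp
  | cons hd tl ih =>
    simp only [List.foldl_cons, List.count_cons, ih, PySem.Dict.getD_modify]
    by_cases hk : k = hd
    · simp [hk]; ring
    · have hk' : ¬hd = k := fun h => hk h.symm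
      simp [hk, hk']

lemma foldl_modify_keys (v : Int) (ks : List String) (d : PySem.Dict String Int)
    (h : ∀ x ∈ ks, d.contains x = true) :
    (ks.foldl (fun d j => d.modify j 0 (· + v)) d).keys = d.keys := by
  induction ks generalizing d with
  | nil => rfl
  | cons hd tl ih =>
    simp only [List.foldl_cons]
    rw [ih, PySem.Dict.keys_modify, PySem.Dict.keys_insert_of_contains _ _ (h hd (by simp))]
    intro x hx
    rw [PySem.Dict.contains_modify]
    simp [h x (List.mem_cons_of_mem _ hx)]

lemma flushCarry_getD (s : List (String × Int)) :
    ∀ (c : Int) (d : PySem.Dict String Int) (k : String),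
      (bFlushCarry c s d).getD k 0 = d.getD k 0 + pend c s k := by
  induction s with
  | nil => simp [bFlushCarry, pend]
  | cons hd tl ih =>
    intro c d k
    obtain ⟨d1, p1⟩ := hd
    simp only [bFlushCarry, pend, ih, PySem.Dict.getD_insert]
    by_cases hk : k = d1
    · simp [hk]; ring
    · simp [hk]

lemma flushCarry_keys (s : List (String × Int)) :
    ∀ (c : Int) (d : PySem.Dict String Int), (∀ x ∈ s.map Prod.fst, d.contains x = true) →
      (bFlushCarry c s d).keys = d.keys := by
  induction s with
  | nil => intro c d _; rfl
  | cons hd tl ih =>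
    intro c d h
    obtain ⟨d1, p1⟩ := hd
    simp only [bFlushCarry]
    rw [ih, PySem.Dict.keys_insert_of_contains _ _ (h d1 (by simp))]
    intro x hx
    rw [PySem.Dict.contains_insert]
    simp [h x (by simp [hx])]

-- the coupling invariant between A's state and B's state
def StInv (branch : List String) (da : PySem.Dict String Int)
    (stack : List (String × Int)) (db : PySem.Dict String Int) : Prop :=
  branch = (stack.map Prod.fst).reverse ∧
  da.keys = db.keys ∧
  (∀ k, da.getD k 0 = db.getD k 0 + pend 0 stack k) ∧
  (stack.map (fun e => e.1.toList.length)).Pairwise (· > ·) ∧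
  (∀ k ∈ stack.map Prod.fst, db.contains k = true) ∧
  db.contains "/" = true ∧
  db.keys.Nodup

-- leaving a directory ('cd ..' with a nonempty branch)
lemma inv_pop {branch : List String} {da : PySem.Dict String Int} {d : String} {p : Int}
    {rest : List (String × Int)} {db : PySem.Dict String Int}
    (h : StInv branch da ((d, p) :: rest) db) :
    StInv branch.dropLast da (bFlush ((d, p) :: rest) db).1 (bFlush ((d, p) :: rest) db).2 := by
  obtain ⟨h1, h2, h3, h4, h5, h6, h7⟩ := h
  have hcd : db.contains d = true := h5 d (by simp)
  have hkeys : (db.insert d (db.getD d 0 + p)).keys = db.keys :=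
    PySem.Dict.keys_insert_of_contains _ _ hcd
  have hbr : branch.dropLast = ((rest.map Prod.fst).reverse) := by
    subst h1; simp
  cases rest with
  | nil =>
    refine ⟨by simpa [bFlush] using hbr, by simpa [bFlush] using h2.trans hkeys.symm, ?_,
      by simp [bFlush], by simp [bFlush], ?_, ?_⟩
    · intro k
      have := h3 k
      simp only [bFlush, pend, PySem.Dict.getD_insert] at *
      by_cases hk : k = d <;> simp [hk] at this ⊢ <;> omega
    · simpa [bFlush, PySem.Dict.contains_insert] using Or.inr h6
    · simpa [bFlush, hkeys] using h7
  | cons hd2 r =>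
    obtain ⟨d2, p2⟩ := hd2
    refine ⟨by simpa [bFlush] using hbr, by simpa [bFlush] using h2.trans hkeys.symm, ?_,
      ?_, ?_, ?_, ?_⟩
    · intro k
      have hthis := h3 k
      have hlt : d2.toList.length < d.toList.length :=
        (List.pairwise_cons.mp (by simpa only [List.map_cons] using h4)).1
          d2.toList.length (by simp)
      have hdd2 : ¬ (d = d2) := fun hq => by rw [hq] at hlt; omega
      simp only [bFlush, pend, PySem.Dict.getD_insert] at hthis ⊢
      have harith : pend ((0 : Int) + p + p2) r k = pend (0 + (p2 + p)) r k := by ring_nf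
      rw [harith] at hthis
      by_cases hk : k = d
      · simp only [hk] at hthis ⊢
        simp [hdd2] at hthis ⊢
        omega
      · by_cases hk2 : k = d2
        · simp only [hk2] at hthis ⊢
          have hd2d : ¬ (d2 = d) := fun hq => hdd2 hq.symm
          simp [hd2d] at hthis ⊢
          omega
        · simp [hk, hk2] at hthis ⊢
          omega
    · simpa [bFlush] using h4.of_cons
    · intro k hk
      simp only [bFlush, PySem.Dict.contains_insert, Bool.or_eq_true, beq_iff_eq]
      refine Or.inr (h5 k ?_)
      simp only [bFlush, List.map_cons] at hk
      simp only [List.map_cons]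
      exact List.mem_cons_of_mem _ hk
    · simpa [bFlush, PySem.Dict.contains_insert] using Or.inr h6
    · simpa [bFlush, hkeys] using h7

-- 'cd /': B banks the whole pending stack, A just resets the branch
lemma inv_cdroot {branch : List String} {da : PySem.Dict String Int}
    {stack : List (String × Int)} {db : PySem.Dict String Int}
    (h : StInv branch da stack db) :
    StInv ["/"] da [("/", 0)] (bFlushAll stack db) := by
  obtain ⟨h1, h2, h3, h4, h5, h6, h7⟩ := h
  have hkeys : (bFlushAll stack db).keys = db.keys := flushCarry_keys stack 0 db h5
  refine ⟨by simp, h2.trans hkeys.symm, ?_, by simp, ?_, ?_, by simpa [hkeys] using h7⟩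
  · intro k
    have := h3 k
    rw [bFlushAll] at *
    rw [flushCarry_getD]
    simp [pend]
    omega
  · intro k hk
    simp only [List.map_cons, List.map_nil, List.mem_singleton] at hk
    subst hk
    rw [PySem.Dict.contains_iff_mem_keys] at h6 ⊢
    rwa [hkeys]
  · rw [PySem.Dict.contains_iff_mem_keys] at h6 ⊢
    rwa [hkeys]

-- entering a directory: the new key is strictly longer than every key on the stack
lemma inv_push {branch : List String} {da : PySem.Dict String Int} {d : String} {p : Int}
    {rest : List (String × Int)} {db : PySem.Dict String Int} (sfx : String)
    (h : StInv branch da ((d, p) :: rest) db) :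
    StInv (branch ++ ["$" ++ d ++ "_" ++ sfx]) (da.insert ("$" ++ d ++ "_" ++ sfx) 0)
      (("$" ++ d ++ "_" ++ sfx, 0) :: (d, p) :: rest) (db.insert ("$" ++ d ++ "_" ++ sfx) 0) := by
  obtain ⟨h1, h2, h3, h4, h5, h6, h7⟩ := h
  set name := "$" ++ d ++ "_" ++ sfx with hname
  have hlen : name.toList.length = d.toList.length + sfx.toList.length + 2 := by
    simp [hname, String.toList_append]
    omega
  have hlonger : ∀ k ∈ ((d, p) :: rest).map Prod.fst, k.toList.length < name.toList.length := by
    intro k hk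
    simp only [List.map_cons, List.mem_cons] at hk
    rcases hk with rfl | hk
    · omega
    · have hmem : k.toList.length ∈ rest.map (fun e => e.1.toList.length) := by
        obtain ⟨e, he, rfl⟩ := List.mem_map.mp hk
        exact List.mem_map.mpr ⟨e, he, rfl⟩
      have hgt := (List.pairwise_cons.mp (by simpa only [List.map_cons] using h4)).1 _ hmem
      omega
  have hfresh : name ∉ ((d, p) :: rest).map Prod.fst := fun hmem => by
    have := hlonger name hmem; omega
  have hcontains_eq : da.contains name = db.contains name := by
    rw [PySem.Dict.contains_eq_decide_mem_keys, PySem.Dict.contains_eq_decide_mem_keys, h2]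
  refine ⟨?_, ?_, ?_, ?_, ?_, ?_, ?_⟩
  · subst h1; simp
  · rcases hc : db.contains name with _ | _
    · rw [PySem.Dict.keys_insert_of_not_contains _ _ (hcontains_eq.trans hc),
        PySem.Dict.keys_insert_of_not_contains _ _ hc, h2]
    · rw [PySem.Dict.keys_insert_of_contains _ _ (hcontains_eq.trans hc),
        PySem.Dict.keys_insert_of_contains _ _ hc, h2]
  · intro k
    have hold := h3 k
    rw [PySem.Dict.getD_insert, PySem.Dict.getD_insert]
    by_cases hk : k = name
    · simp only [if_pos hk]
      have hz0 : pend 0 ((d, p) :: rest) name = 0 := pend_eq_zero_of_not_mem _ 0 name hfresh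
      have hz : pend 0 ((name, 0) :: (d, p) :: rest) k = 0 := by
        rw [hk]
        have hu : pend 0 ((name, 0) :: (d, p) :: rest) name
            = (if name = name then (0 : Int) + 0 else 0) + pend (0 + 0) ((d, p) :: rest) name :=
          rfl
        rw [hu]
        simp [hz0]
      rw [hz]
      omega
    · simp only [if_neg hk]
      have hps : pend 0 ((name, 0) :: (d, p) :: rest) k = pend 0 ((d, p) :: rest) k := by
        simp [pend, hk]
      rw [hps]; exact hold
  · simp only [List.map_cons]
    refine List.pairwise_cons.mpr ⟨?_, by simpa only [List.map_cons] using h4⟩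
    intro y hy
    have hy' : y ∈ ((d, p) :: rest).map (fun e => e.1.toList.length) := by
      simpa only [List.map_cons] using hy
    obtain ⟨e, he, rfl⟩ := List.mem_map.mp hy'
    exact hlonger e.1 (List.mem_map.mpr ⟨e, he, rfl⟩)
  · intro k hk
    rw [PySem.Dict.contains_insert]
    simp only [List.map_cons, List.mem_cons] at hk
    rcases hk with rfl | hk
    · simp
    · simp only [Bool.or_eq_true, beq_iff_eq]
      exact Or.inr (h5 k (by simpa using hk))
  · rw [PySem.Dict.contains_insert]; simp [h6]
  · exact PySem.Dict.nodup_keys_insert _ _ _ h7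

-- a file line: A walks the whole branch, B bumps only the top pending counter
lemma inv_file {branch : List String} {da : PySem.Dict String Int} {d : String} {p : Int}
    {rest : List (String × Int)} {db : PySem.Dict String Int} (v : Int)
    (h : StInv branch da ((d, p) :: rest) db) :
    StInv branch (branch.foldl (fun dd dir => dd.modify dir 0 (· + v)) da)
      ((d, p + v) :: rest) db := by
  obtain ⟨h1, h2, h3, h4, h5, h6, h7⟩ := h
  have hbr : ∀ x ∈ branch, da.contains x = true := by
    intro x hx
    rw [PySem.Dict.contains_iff_mem_keys, h2, ← PySem.Dict.contains_iff_mem_keys]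
    apply h5
    rw [h1, List.mem_reverse] at hx
    exact hx
  refine ⟨h1, (foldl_modify_keys v branch da hbr).trans h2, ?_, by simpa using h4,
    by simpa using h5, h6, h7⟩
  intro k
  rw [foldl_modify_getD, h3 k]
  have hcount : branch.count k = (((d, p) :: rest).map Prod.fst).count k := by
    subst h1; exact List.count_reverse
  rw [hcount]
  have hshift : pend ((0 : Int) + p + v) rest k
      = pend (0 + p) rest k + v * ((rest.map Prod.fst).count k) := pend_shift rest (0 + p) v k
  simp only [pend, List.map_cons, List.count_cons]
  have harg : (0 : Int) + (p + v) = 0 + p + v := by ring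
  rw [harg, hshift]
  by_cases hk : k = d
  · have : ¬ d = k → False := fun h => h hk.symm
    simp [hk]
    ring
  · have hk' : ¬ d = k := fun h => hk h.symm
    simp [hk, hk']
    ring

lemma fold_inv (lines : List String) :
    ∀ branch da stack db, StInv branch da stack db → preAux lines stack.length = true →
      StInv (lines.foldl aStep (branch, da)).1 (lines.foldl aStep (branch, da)).2
          (lines.foldl bStep (stack, db)).1 (lines.foldl bStep (stack, db)).2 := by
  induction lines with
  | nil => intro branch da stack db h _; simpa using h
  | cons line rest ih =>
    intro branch da stack db h hpre
    simp only [List.foldl_cons]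
    by_cases h1 : PySem.Str.startswith line "$" = true
    · by_cases h2 : PySem.Str.startswith (PySem.Str.slice line (some 2) none) "cd .." = true
      · -- cd ..
        simp only [preAux, h1, h2, if_true, Bool.and_eq_true, decide_eq_true_eq] at hpre
        obtain ⟨hd1, hpre⟩ := hpre
        obtain ⟨⟨d, p⟩, st', rfl⟩ : ∃ e st', stack = e :: st' := by
          cases stack with
          | nil => simp at hd1
          | cons e st' => exact ⟨e, st', rfl⟩
        have hA : aStep (branch, da) line = (branch.dropLast, da) := by
          simp only [aStep, h1, h2, if_true]
        have hB : bStep ((d, p) :: st', db) line = bFlush ((d, p) :: st') db := by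
          simp only [bStep, h1, h2, if_true, ne_eq, List.cons_ne_nil, not_false_eq_true]
        rw [hA, hB]
        apply ih _ _ _ _ (inv_pop h)
        have hlen : (bFlush ((d, p) :: st') db).1.length = st'.length := by
          cases st' with
          | nil => simp [bFlush]
          | cons e r => obtain ⟨a, b⟩ := e; simp [bFlush]
        rw [hlen]
        simpa using hpre
      · by_cases h3 : PySem.Str.startswith (PySem.Str.slice line (some 2) none) "cd /" = true
        · -- cd /
          simp only [preAux, h1, h2, h3, if_true, if_false, Bool.false_eq_true] at hpre
          have hA : aStep (branch, da) line = (["/"], da) := by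
            simp only [aStep, h1, h2, h3, if_true, if_false, Bool.false_eq_true]
          have hB : bStep (stack, db) line = ([("/", 0)], bFlushAll stack db) := by
            simp only [bStep, h1, h2, h3, if_true, if_false, Bool.false_eq_true, ne_eq]
          rw [hA, hB]
          exact ih _ _ _ _ (inv_cdroot h) (by simpa using hpre)
        · by_cases h4 : PySem.Str.startswith (PySem.Str.slice line (some 2) none) "cd" = true
          · -- cd <name>
            simp only [preAux, h1, h2, h3, h4, if_true, if_false, Bool.false_eq_true,
              Bool.and_eq_true, decide_eq_true_eq] at hpre
            obtain ⟨hd1, hpre⟩ := hpre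
            obtain ⟨⟨d, p⟩, st', rfl⟩ : ∃ e st', stack = e :: st' := by
              cases stack with
              | nil => simp at hd1
              | cons e st' => exact ⟨e, st', rfl⟩
            have hlast : branch.getLastD "" = d := by
              rw [h.1]; simp
            have hA : aStep (branch, da) line
                = (branch ++ ["$" ++ d ++ "_" ++ PySem.Str.slice (PySem.Str.slice line (some 2) none) (some 3) none],
                   da.insert ("$" ++ d ++ "_" ++ PySem.Str.slice (PySem.Str.slice line (some 2) none) (some 3) none) 0) := by
              simp only [aStep, h1, h2, h3, h4, hlast, if_true, if_false, Bool.false_eq_true]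
            have hB : bStep ((d, p) :: st', db) line
                = (("$" ++ d ++ "_" ++ PySem.Str.slice (PySem.Str.slice line (some 2) none) (some 3) none, 0) :: (d, p) :: st',
                   db.insert ("$" ++ d ++ "_" ++ PySem.Str.slice (PySem.Str.slice line (some 2) none) (some 3) none) 0) := by
              simp only [bStep, h1, h2, h3, h4, if_true, if_false, Bool.false_eq_true, ne_eq, List.cons_ne_nil, not_false_eq_true]
            rw [hA, hB]
            exact ih _ _ _ _ (inv_push _ h) (by simpa using hpre)
          · -- other '$' line: nothing happens
            simp only [preAux, h1, h2, h3, h4, if_true, if_false, Bool.false_eq_true] at hpre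
            have hA : aStep (branch, da) line = (branch, da) := by
              simp only [aStep, h1, h2, h3, h4, if_true, if_false, Bool.false_eq_true]
            have hB : bStep (stack, db) line = (stack, db) := by
              simp only [bStep, h1, h2, h3, h4, if_true, if_false, Bool.false_eq_true, ne_eq]
            rw [hA, hB]
            exact ih _ _ _ _ h hpre
    · by_cases h5 : (PySem.Str.startswith line "dir" || PySem.Str.startswith line "ls") = true
      · -- dir / ls output line: nothing happens
        simp only [preAux, h1, h5, if_true, if_false, Bool.false_eq_true] at hpre
        have hA : aStep (branch, da) line = (branch, da) := by
          simp only [aStep, h1, h5, if_true, if_false, Bool.false_eq_true]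
        have hB : bStep (stack, db) line = (stack, db) := by
          simp only [bStep, h1, h5, if_true, if_false, Bool.false_eq_true, ne_eq]
        rw [hA, hB]
        exact ih _ _ _ _ h hpre
      · -- file line
        simp only [preAux, h1, h5, if_false, Bool.false_eq_true,
          Bool.and_eq_true] at hpre
        obtain ⟨-, hpre⟩ := hpre
        cases stack with
        | nil =>
          have hbr : branch = [] := by simpa using h.1
          have hA : aStep (branch, da) line = (branch, da) := by
            simp only [aStep, h1, h5, hbr, if_false, Bool.false_eq_true, List.foldl_nil]
          have hB : bStep (([] : List (String × Int)), db) line = ([], db) := by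
            simp only [bStep, h1, h5, if_false, Bool.false_eq_true, ne_eq]
          rw [hA, hB]
          exact ih _ _ _ _ h hpre
        | cons e st' =>
          obtain ⟨d, p⟩ := e
          have hA : aStep (branch, da) line
              = (branch, branch.foldl (fun dd dir => dd.modify dir 0
                  (· + (PySem.Int.ofStr? (((PySem.Str.split? line " ").getD []).headD "")).getD 0)) da) := by
            simp only [aStep, h1, h5, if_false, Bool.false_eq_true]
          have hB : bStep ((d, p) :: st', db) line
              = ((d, p + (PySem.Int.ofStr? (((PySem.Str.split? line " ").getD []).headD "")).getD 0) :: st', db) := by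
            simp only [bStep, h1, h5, if_true, if_false, Bool.false_eq_true, ne_eq, List.cons_ne_nil, not_false_eq_true]
          rw [hA, hB]
          exact ih _ _ _ _ (inv_file _ h) (by simpa using hpre)

-- ===== VERDICT (by name: the statement is the Claim_ definition above) =====
theorem calc_dir_sizes_spec : Claim_equal_calc_dir_sizes := by
  intro input _ hpre
  unfold Spec_calc_dir_sizes calc_dir_sizes calc_dir_sizes_alt
  have h0 : StInv [] (PySem.Dict.ofList [("/", (0 : Int))]) []
      (PySem.Dict.ofList [("/", (0 : Int))]) := by
    refine ⟨rfl, rfl, ?_, by simp, by simp, by decide, by decide⟩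
    intro k; simp [pend]
  have h := fold_inv input [] (PySem.Dict.ofList [("/", (0 : Int))]) []
    (PySem.Dict.ofList [("/", (0 : Int))]) h0 hpre
  obtain ⟨i1, i2, i3, i4, i5, i6, i7⟩ := h
  set ra := input.foldl aStep ([], PySem.Dict.ofList [("/", (0 : Int))]) with hra
  set rb := input.foldl bStep ([], PySem.Dict.ofList [("/", (0 : Int))]) with hrb
  have hkeys : (bFlushAll rb.1 rb.2).keys = rb.2.keys := flushCarry_keys _ 0 _ i5
  have hnodupB : (bFlushAll rb.1 rb.2).keys.Nodup := by rw [hkeys]; exact i7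
  have hnodupA : ra.2.keys.Nodup := by rw [i2]; exact i7
  rw [PySem.Dict.items_eq_map_keys _ hnodupA 0, PySem.Dict.items_eq_map_keys _ hnodupB 0,
    hkeys, ← i2]
  refine List.map_congr_left ?_
  intro k _
  have hgd : (bFlushAll rb.1 rb.2).getD k 0 = rb.2.getD k 0 + pend 0 rb.1 k :=
    flushCarry_getD rb.1 0 rb.2 k
  rw [hgd, ← i3 k]
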